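-- pv_equiv track=rewrite | github.com/cluejws/codingTest | pog/L1/L1_258712_hash.py | solution
-- ===== SOURCE A (Python) =====
-- def makeCombination(arr):
--     def dfs(cnt, idx):
--         if cnt == 2:
--             result.append(set(temp))
--             return
--
--         for i in range(idx, n):
--             temp.append(arr[i])
--             dfs(cnt + 1, i + 1)
--             temp.pop()
--
--     # 1.
--     n = len(arr)
--
--     result = []
--     temp = []
--     dfs(0, 0)
--
--     return result
--
-- def solution(friends, gifts):
--     # 계산1: 선물 기록 순회로, 선물 기록/선물 지수
--     dict_gift = {}
--     dict_friend_point = {}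
--     for gift in gifts:
--         a, b = gift.split()
--
--         # 1-1: 선물 기록
--         if (a,b) not in dict_gift:
--             dict_gift[(a,b)] = 1
--         else:
--             dict_gift[(a,b)] += 1
--
--         # 1-2: 선물 지수
--         if a not in dict_friend_point:
--             dict_friend_point[a] = 1
--         else:
--             dict_friend_point[a] += 1
--
--         if b not in dict_friend_point:
--             dict_friend_point[b] = -1
--         else:
--             dict_friend_point[b] -= 1
--
--     # 계산2: 결과 수
--     dict_cnt = {}
--     for friend in friends:
--         dict_cnt[friend] = 0
--
--     # 계산3: 사람 조합
--     n = len(dict_cnt)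
--     combis = makeCombination(friends)
--     for a, b in combis:
--         # 3-1: 선물 기록
--         a_cnt = dict_gift[(a,b)] if (a,b) in dict_gift else 0
--         b_cnt = dict_gift[(b,a)] if (b,a) in dict_gift else 0
--         if a_cnt > b_cnt:
--             dict_cnt[a] += 1
--             continue
--
--         if a_cnt < b_cnt:
--             dict_cnt[b] += 1
--             continue
--
--         # 3-2: 선물 지수
--         a_point = dict_friend_point[a] if a in dict_friend_point else 0
--         b_point = dict_friend_point[b] if b in dict_friend_point else 0
--         if a_point > b_point:
--             dict_cnt[a] += 1
--             continue
--
--         if a_point < b_point: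
--             dict_cnt[b] += 1
--             continue
--
--     # 출력
--     max_cnt = 0
--     for friend in dict_cnt:
--         max_cnt = max(max_cnt, dict_cnt[friend])
--     return max_cnt
-- ===== SOURCE B (Python) =====
-- def solution(friends, gifts):
--     # One pass builds the gift-pair counts and the net gift points; then all
--     # unordered pairs are visited with plain index loops (no recursive
--     # combination builder); max over the win counts at the end.
--     give = {}
--     point = {}
--     for g in gifts:
--         a, b = g.split()
--         give[(a, b)] = give.get((a, b), 0) + 1
--         point[a] = point.get(a, 0) + 1
--         point[b] = point.get(b, 0) - 1
--     n = len(friends)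
--     wins = {f: 0 for f in friends}
--     for i in range(n):
--         for j in range(i + 1, n):
--             a, b = friends[i], friends[j]
--             ac = give.get((a, b), 0)
--             bc = give.get((b, a), 0)
--             if ac != bc:
--                 w = a if ac > bc else b
--             else:
--                 ap = point.get(a, 0)
--                 bp = point.get(b, 0)
--                 if ap == bp:
--                     continue
--                 w = a if ap > bp else b
--             wins[w] += 1
--     return max(wins.values(), default=0)
-- ===== Notes on version B (the rewrite author's own statement) =====
-- stated objective: simpler
-- what changed: Drops the recursive set-building combination helper (makeCombination/dfs with a shared temp list) entirely: B visits all unordered pairs with two plain index loops, builds both dicts with dict.get in one pass, picks a single winner per pair, and returns max(wins.values(), default=0).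
import Mathlib
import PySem

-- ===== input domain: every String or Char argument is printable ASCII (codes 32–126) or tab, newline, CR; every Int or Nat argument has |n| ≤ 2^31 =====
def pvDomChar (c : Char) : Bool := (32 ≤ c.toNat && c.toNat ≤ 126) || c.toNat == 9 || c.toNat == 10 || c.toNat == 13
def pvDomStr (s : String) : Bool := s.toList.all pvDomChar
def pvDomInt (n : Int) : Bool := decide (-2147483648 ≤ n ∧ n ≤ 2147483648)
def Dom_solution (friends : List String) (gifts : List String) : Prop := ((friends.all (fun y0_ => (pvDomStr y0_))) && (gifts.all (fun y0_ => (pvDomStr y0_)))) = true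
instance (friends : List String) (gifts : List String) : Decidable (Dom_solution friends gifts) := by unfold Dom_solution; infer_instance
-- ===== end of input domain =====

-- B replaces A's recursive set-building combination helper by two plain index loops over
-- the friend list (same pairwise winner logic, dicts built with .get in one pass): simpler.


-- ===== PORT A =====
-- makeCombination's dfs; the Nat argument is 2 - cnt (a pure totality device: the Python is
-- only ever called with cnt ≤ 2; '2 - cnt = 0' is exactly the 'cnt == 2' test).
-- set(temp) is modelled as PySem.Set.ofList temp (first-insertion order); Python's hash
-- iteration order over the 2-element set is not modelled — A's winner logic is symmetric
-- in the pair, so the returned Int does not depend on it.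
def dfsA (arr : List String) (n : Int) : Nat → Int → List String → List (List String) → List (List String)
  | 0, _idx, temp, result => result ++ [PySem.Set.ofList temp]
  | fuel+1, idx, temp, result =>
      (PySem.List.pyRange idx n 1).foldl
        (fun res i => dfsA arr n fuel (i+1) (temp ++ [(PySem.List.pyGet? arr i).getD ""]) res)
        result

def makeCombination (arr : List String) : List (List String) :=
  dfsA arr (arr.length : Int) 2 0 [] []

def solution (friends : List String) (gifts : List String) : Int :=
  let dicts := gifts.foldl
    (fun (st : PySem.Dict (String × String) Int × PySem.Dict String Int) gift =>
      let parts := PySem.Str.split₀ gift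
      let a := parts[0]?.getD ""      -- 'a, b = gift.split()'; unpack failure = ValueError,
      let b := parts[1]?.getD ""      -- excluded by Pre_solution
      let dg := if st.1.contains (a, b) = false then st.1.insert (a, b) 1
                else st.1.insert (a, b) (st.1.getD (a, b) 0 + 1)
      let dp := if st.2.contains a = false then st.2.insert a 1
                else st.2.insert a (st.2.getD a 0 + 1)
      let dp := if dp.contains b = false then dp.insert b (-1)
                else dp.insert b (dp.getD b 0 - 1)
      (dg, dp))
    (PySem.Dict.empty, PySem.Dict.empty)
  let dict_gift := dicts.1
  let dict_point := dicts.2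
  let dict_cnt0 := friends.foldl (fun d f => d.insert f (0 : Int)) PySem.Dict.empty
  let dict_cnt := (makeCombination friends).foldl
    (fun d pr =>
      let a := pr[0]?.getD ""         -- 'for a, b in combis' (ValueError on a collapsed
      let b := pr[1]?.getD ""         -- 1-element set is excluded by Pre_solution)
      let a_cnt := if dict_gift.contains (a, b) then dict_gift.getD (a, b) 0 else 0
      let b_cnt := if dict_gift.contains (b, a) then dict_gift.getD (b, a) 0 else 0
      if a_cnt > b_cnt then d.insert a (d.getD a 0 + 1)
      else if a_cnt < b_cnt then d.insert b (d.getD b 0 + 1)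
      else
        let a_point := if dict_point.contains a then dict_point.getD a 0 else 0
        let b_point := if dict_point.contains b then dict_point.getD b 0 else 0
        if a_point > b_point then d.insert a (d.getD a 0 + 1)
        else if a_point < b_point then d.insert b (d.getD b 0 + 1)
        else d)
    dict_cnt0
  dict_cnt.keys.foldl (fun m f => max m (dict_cnt.getD f 0)) 0

-- ===== PORT B =====
def solution_alt (friends : List String) (gifts : List String) : Int :=
  let st := gifts.foldl
    (fun (st : PySem.Dict (String × String) Int × PySem.Dict String Int) g =>
      let parts := PySem.Str.split₀ g
      let a := parts[0]?.getD ""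
      let b := parts[1]?.getD ""
      let give := st.1.insert (a, b) (st.1.getD (a, b) 0 + 1)
      let point := st.2.insert a (st.2.getD a 0 + 1)
      let point := point.insert b (point.getD b 0 - 1)
      (give, point))
    (PySem.Dict.empty, PySem.Dict.empty)
  let give := st.1
  let point := st.2
  let n : Int := friends.length
  let wins0 := friends.foldl (fun d f => d.insert f (0 : Int)) PySem.Dict.empty
  let wins := (PySem.List.pyRange 0 n 1).foldl
    (fun w i =>
      (PySem.List.pyRange (i + 1) n 1).foldl
        (fun w j =>
          let a := (PySem.List.pyGet? friends i).getD ""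
          let b := (PySem.List.pyGet? friends j).getD ""
          let ac := give.getD (a, b) 0
          let bc := give.getD (b, a) 0
          if ac ≠ bc then
            let wnr := if ac > bc then a else b
            w.insert wnr (w.getD wnr 0 + 1)
          else
            let ap := point.getD a 0
            let bp := point.getD b 0
            if ap = bp then w
            else
              let wnr := if ap > bp then a else b
              w.insert wnr (w.getD wnr 0 + 1))
        w)
    wins0
  -- max(wins.values(), default=0): all win counts are ≥ 0, so the running max from 0 is exact
  wins.values.foldl max 0

-- ===== PRECONDITION & SPEC =====
-- Pre_ excludes exactly the inputs where the Python A raises: a duplicated friend name makes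
-- 'a, b = <1-element set>' raise ValueError, and a gift line whose split() does not have
-- exactly two words makes 'a, b = gift.split()' raise ValueError.
def Pre_solution (friends : List String) (gifts : List String) : Prop :=
  friends.Nodup ∧ ∀ g ∈ gifts, (PySem.Str.split₀ g).length = 2
instance (friends : List String) (gifts : List String) : Decidable (Pre_solution friends gifts) := by
  unfold Pre_solution; infer_instance
def pvWitness_solution : List String × List String :=
  (["muzi", "ryan", "frodo"], ["muzi ryan", "ryan frodo", "muzi ryan"])

def Spec_solution (friends : List String) (gifts : List String) (out : Int) : Prop := out = solution_alt friends gifts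
instance (friends : List String) (gifts : List String) (out : Int) : Decidable (Spec_solution friends gifts out) := by unfold Spec_solution; infer_instance

-- ===== CLAIM (what is proved, stated in full; the proofs are below) =====
def Claim_equal_solution : Prop := ∀ (friends : List String) (gifts : List String), Dom_solution friends gifts → Pre_solution friends gifts → Spec_solution friends gifts (solution friends gifts)

-- ===== LEMMAS AND PROOFS =====

-- generic: a fold whose step preserves key-nodup preserves it
theorem pv_foldl_keys_nodup {α κ ν : Type} [BEq κ] (f : PySem.Dict κ ν → α → PySem.Dict κ ν)
    (hstep : ∀ d x, (PySem.Dict.keys d).Nodup → (PySem.Dict.keys (f d x)).Nodup) :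
    ∀ (l : List α) (d : PySem.Dict κ ν), (PySem.Dict.keys d).Nodup → (PySem.Dict.keys (l.foldl f d)).Nodup := by
  intro l
  induction l with
  | nil => intro d h; exact h
  | cons x t ih => intro d h; exact ih (f d x) (hstep d x h)

theorem pv_getD_if_contains {κ : Type} [BEq κ] [LawfulBEq κ] (d : PySem.Dict κ Int) (k : κ) :
    (if d.contains k then d.getD k 0 else 0) = d.getD k 0 := by
  cases h : d.contains k with
  | false => simp [PySem.Dict.getD_of_not_contains d 0 h]
  | true => simp

theorem pv_set_pair (a b : String) (h : a ≠ b) : PySem.Set.ofList [a, b] = [a, b] := by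
  simp [PySem.Set.ofList, PySem.Set.add, PySem.Set.contains, Ne.symm h]

theorem pv_pyGetD (xs : List String) (i : Int) (h0 : 0 ≤ i) (h : i.toNat < xs.length) :
    (PySem.List.pyGet? xs i).getD "" = xs[i.toNat] := by
  have hlt : i < (xs.length : Int) := by omega
  simp [PySem.List.pyGet?, PySem.List.pyIdx?, h0, hlt, h]

theorem pv_dfs1 (arr : List String) (n : Int) (idx : Int) (temp : List String) (res : List (List String)) :
    dfsA arr n 1 idx temp res
      = res ++ (PySem.List.pyRange idx n 1).map
          (fun j => PySem.Set.ofList (temp ++ [(PySem.List.pyGet? arr j).getD ""])) := by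
  show (PySem.List.pyRange idx n 1).foldl _ res = _
  trans ((PySem.List.pyRange idx n 1).foldl
      (fun res j => res ++ [PySem.Set.ofList (temp ++ [(PySem.List.pyGet? arr j).getD ""])]) res)
  · exact PySem.List.foldl_congr_mem _ _ _ _ (fun acc x _ => rfl)
  · exact PySem.List.foldl_append_singleton_eq_map ..

theorem pv_dfs2 (arr : List String) (n : Int) (idx : Int) (temp : List String) (res : List (List String)) :
    dfsA arr n 2 idx temp res
      = res ++ (PySem.List.pyRange idx n 1).flatMap
          (fun i => (PySem.List.pyRange (i + 1) n 1).map
            (fun j => PySem.Set.ofList (temp ++ [(PySem.List.pyGet? arr i).getD ""]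
                                             ++ [(PySem.List.pyGet? arr j).getD ""]))) := by
  show (PySem.List.pyRange idx n 1).foldl _ res = _
  trans ((PySem.List.pyRange idx n 1).foldl
      (fun res i => res ++ (PySem.List.pyRange (i + 1) n 1).map
            (fun j => PySem.Set.ofList (temp ++ [(PySem.List.pyGet? arr i).getD ""]
                                             ++ [(PySem.List.pyGet? arr j).getD ""]))) res)
  · exact PySem.List.foldl_congr_mem _ _ _ _
      (fun acc i _ => pv_dfs1 arr n (i + 1) (temp ++ [(PySem.List.pyGet? arr i).getD ""]) acc)
  · exact PySem.List.foldl_append_eq_flatMap ..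

-- proof-side names for the phases of the two ports (each is a literal copy of the
-- corresponding lambda, so the pv_solA/pv_solB lemmas hold by rfl)
def AStep1 (st : PySem.Dict (String × String) Int × PySem.Dict String Int) (gift : String) :
    PySem.Dict (String × String) Int × PySem.Dict String Int :=
  let parts := PySem.Str.split₀ gift
  let a := parts[0]?.getD ""
  let b := parts[1]?.getD ""
  let dg := if st.1.contains (a, b) = false then st.1.insert (a, b) 1
            else st.1.insert (a, b) (st.1.getD (a, b) 0 + 1)
  let dp := if st.2.contains a = false then st.2.insert a 1
            else st.2.insert a (st.2.getD a 0 + 1)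
  let dp := if dp.contains b = false then dp.insert b (-1)
            else dp.insert b (dp.getD b 0 - 1)
  (dg, dp)

def BStep1 (st : PySem.Dict (String × String) Int × PySem.Dict String Int) (g : String) :
    PySem.Dict (String × String) Int × PySem.Dict String Int :=
  let parts := PySem.Str.split₀ g
  let a := parts[0]?.getD ""
  let b := parts[1]?.getD ""
  let give := st.1.insert (a, b) (st.1.getD (a, b) 0 + 1)
  let point := st.2.insert a (st.2.getD a 0 + 1)
  let point := point.insert b (point.getD b 0 - 1)
  (give, point)

def AStep2 (dict_gift : PySem.Dict (String × String) Int) (dict_point : PySem.Dict String Int)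
    (d : PySem.Dict String Int) (pr : List String) : PySem.Dict String Int :=
  let a := pr[0]?.getD ""
  let b := pr[1]?.getD ""
  let a_cnt := if dict_gift.contains (a, b) then dict_gift.getD (a, b) 0 else 0
  let b_cnt := if dict_gift.contains (b, a) then dict_gift.getD (b, a) 0 else 0
  if a_cnt > b_cnt then d.insert a (d.getD a 0 + 1)
  else if a_cnt < b_cnt then d.insert b (d.getD b 0 + 1)
  else
    let a_point := if dict_point.contains a then dict_point.getD a 0 else 0
    let b_point := if dict_point.contains b then dict_point.getD b 0 else 0
    if a_point > b_point then d.insert a (d.getD a 0 + 1)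
    else if a_point < b_point then d.insert b (d.getD b 0 + 1)
    else d

def BStep2 (give : PySem.Dict (String × String) Int) (point : PySem.Dict String Int)
    (friends : List String) (w : PySem.Dict String Int) (i j : Int) : PySem.Dict String Int :=
  let a := (PySem.List.pyGet? friends i).getD ""
  let b := (PySem.List.pyGet? friends j).getD ""
  let ac := give.getD (a, b) 0
  let bc := give.getD (b, a) 0
  if ac ≠ bc then
    let wnr := if ac > bc then a else b
    w.insert wnr (w.getD wnr 0 + 1)
  else
    let ap := point.getD a 0
    let bp := point.getD b 0
    if ap = bp then w
    else
      let wnr := if ap > bp then a else b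
      w.insert wnr (w.getD wnr 0 + 1)

theorem pv_solA (friends gifts : List String) :
    solution friends gifts =
      (let dicts := gifts.foldl AStep1 (PySem.Dict.empty, PySem.Dict.empty)
       let cnt := (makeCombination friends).foldl (AStep2 dicts.1 dicts.2)
         (friends.foldl (fun d f => d.insert f (0 : Int)) PySem.Dict.empty)
       cnt.keys.foldl (fun m f => max m (cnt.getD f 0)) 0) := rfl

theorem pv_solB (friends gifts : List String) :
    solution_alt friends gifts =
      (let st := gifts.foldl BStep1 (PySem.Dict.empty, PySem.Dict.empty)
       let wins := (PySem.List.pyRange 0 (friends.length : Int) 1).foldl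
         (fun w i => (PySem.List.pyRange (i + 1) (friends.length : Int) 1).foldl
           (fun w j => BStep2 st.1 st.2 friends w i j) w)
         (friends.foldl (fun d f => d.insert f (0 : Int)) PySem.Dict.empty)
       wins.values.foldl max 0) := rfl

-- '<dict>[k] = <dict>.get(k, 0) ± 1' absorbs A's not-in/in case split
theorem pv_upd {κ : Type} [BEq κ] [LawfulBEq κ] (d : PySem.Dict κ Int) (k : κ) :
    (if d.contains k = false then d.insert k 1 else d.insert k (d.getD k 0 + 1))
      = d.insert k (d.getD k 0 + 1) := by
  by_cases h : d.contains k = false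
  · rw [if_pos h]; congr 1; rw [PySem.Dict.getD_of_not_contains d 0 h]; norm_num
  · rw [if_neg h]

theorem pv_upd_sub {κ : Type} [BEq κ] [LawfulBEq κ] (d : PySem.Dict κ Int) (k : κ) :
    (if d.contains k = false then d.insert k (-1) else d.insert k (d.getD k 0 - 1))
      = d.insert k (d.getD k 0 - 1) := by
  by_cases h : d.contains k = false
  · rw [if_pos h]; congr 1; rw [PySem.Dict.getD_of_not_contains d 0 h]; norm_num
  · rw [if_neg h]

-- the two first-pass loops build the same pair of dicts, gift by gift
theorem pv_step1_eq (st : PySem.Dict (String × String) Int × PySem.Dict String Int) (g : String) :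
    AStep1 st g = BStep1 st g := by
  unfold AStep1 BStep1
  dsimp only
  rw [pv_upd, pv_upd, pv_upd_sub]

-- per-pair winner update: A's branch chain on the set pair = B's single-winner form
theorem pv_step2_eq (dg : PySem.Dict (String × String) Int) (dp : PySem.Dict String Int)
    (friends : List String) (hnd : friends.Nodup) (d : PySem.Dict String Int) (i j : Int)
    (hi0 : 0 ≤ i) (hij : i < j) (hj : j < (friends.length : Int)) :
    AStep2 dg dp d (PySem.Set.ofList ([(PySem.List.pyGet? friends i).getD ""]
                                   ++ [(PySem.List.pyGet? friends j).getD ""]))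
      = BStep2 dg dp friends d i j := by
  have hjn : j.toNat < friends.length := by omega
  have hin : i.toNat < friends.length := by omega
  have ha : (PySem.List.pyGet? friends i).getD "" = friends[i.toNat] := pv_pyGetD friends i hi0 hin
  have hb : (PySem.List.pyGet? friends j).getD "" = friends[j.toNat] := pv_pyGetD friends j (by omega) hjn
  have hab : (PySem.List.pyGet? friends i).getD "" ≠ (PySem.List.pyGet? friends j).getD "" := by
    rw [ha, hb]
    exact fun he => absurd (hnd.getElem_inj_iff.mp he) (by omega)
  rw [show [(PySem.List.pyGet? friends i).getD ""] ++ [(PySem.List.pyGet? friends j).getD ""]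
        = [(PySem.List.pyGet? friends i).getD "", (PySem.List.pyGet? friends j).getD ""] from rfl,
      pv_set_pair _ _ hab]
  unfold AStep2 BStep2
  dsimp only
  simp only [List.getElem?_cons_zero, List.getElem?_cons_succ, Option.getD_some]
  rw [pv_getD_if_contains, pv_getD_if_contains, pv_getD_if_contains, pv_getD_if_contains]
  split_ifs <;> first | rfl | (exfalso; omega)

theorem pv_BStep2_nodup (dg : PySem.Dict (String × String) Int) (dp : PySem.Dict String Int)
    (friends : List String) (w : PySem.Dict String Int) (i j : Int) (h : w.keys.Nodup) :
    (BStep2 dg dp friends w i j).keys.Nodup := by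
  unfold BStep2
  dsimp only
  split_ifs <;> first | exact h | exact PySem.Dict.nodup_keys_insert _ _ _ h

theorem pv_main (friends gifts : List String) (hnd : friends.Nodup)
    (_hg : ∀ g ∈ gifts, (PySem.Str.split₀ g).length = 2) :
    solution friends gifts = solution_alt friends gifts := by
  rw [pv_solA, pv_solB]
  dsimp only
  rw [PySem.List.foldl_congr_mem gifts AStep1 BStep1 _ (fun acc x _ => pv_step1_eq acc x)]
  have hW : (makeCombination friends).foldl
        (AStep2 (gifts.foldl BStep1 (PySem.Dict.empty, PySem.Dict.empty)).1
                (gifts.foldl BStep1 (PySem.Dict.empty, PySem.Dict.empty)).2)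
        (friends.foldl (fun d f => d.insert f (0 : Int)) PySem.Dict.empty)
      = (PySem.List.pyRange 0 (friends.length : Int) 1).foldl
        (fun w i => (PySem.List.pyRange (i + 1) (friends.length : Int) 1).foldl
          (fun w j => BStep2 (gifts.foldl BStep1 (PySem.Dict.empty, PySem.Dict.empty)).1
                             (gifts.foldl BStep1 (PySem.Dict.empty, PySem.Dict.empty)).2
                             friends w i j) w)
        (friends.foldl (fun d f => d.insert f (0 : Int)) PySem.Dict.empty) := by
    rw [makeCombination, pv_dfs2]
    simp only [List.nil_append, List.foldl_flatMap, List.foldl_map]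
    refine PySem.List.foldl_congr_mem _ _ _ _ (fun acc i hi => ?_)
    refine PySem.List.foldl_congr_mem _ _ _ _ (fun acc2 j hj => ?_)
    rw [PySem.List.mem_pyRange_one] at hi hj
    exact pv_step2_eq _ _ friends hnd acc2 i j hi.1 (by omega) hj.2
  rw [hW]
  have hnd0 : ((friends.foldl (fun d f => d.insert f (0 : Int)) PySem.Dict.empty).keys).Nodup :=
    PySem.Dict.nodup_keys_foldl_insert friends (fun _ _ => (0 : Int)) PySem.Dict.empty
      PySem.Dict.nodup_keys_empty
  have hndW : (((PySem.List.pyRange 0 (friends.length : Int) 1).foldl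
        (fun w i => (PySem.List.pyRange (i + 1) (friends.length : Int) 1).foldl
          (fun w j => BStep2 (gifts.foldl BStep1 (PySem.Dict.empty, PySem.Dict.empty)).1
                             (gifts.foldl BStep1 (PySem.Dict.empty, PySem.Dict.empty)).2
                             friends w i j) w)
        (friends.foldl (fun d f => d.insert f (0 : Int)) PySem.Dict.empty)).keys).Nodup := by
    refine pv_foldl_keys_nodup _ (fun w i h => ?_) _ _ hnd0
    exact pv_foldl_keys_nodup _ (fun w' j h' => pv_BStep2_nodup _ _ friends w' i j h') _ w h
  rw [PySem.Dict.values_eq_map_keys _ hndW 0, List.foldl_map]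

-- ===== VERDICT (by name: the statement is the Claim_ definition above) =====
theorem solution_spec : Claim_equal_solution := by
  intro friends gifts _ hpre
  exact pv_main friends gifts hpre.1 hpre.2
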